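-- pv_equiv track=rewrite | github.com/SureAndYang/Leetcode | 20230831/MinimumPenaltyForAShop_2483.py | bestClosingTime_3
-- ===== SOURCE A (Python) =====
-- def bestClosingTime_3(customers: str) -> int:
--      penalty = [0] * (len(customers) + 1)
--      for i, status in enumerate(customers, start=1):
--          # Close after the current status.
--          if status == 'Y':
--              penalty[i] = penalty[i-1]
--              for j in range(i):
--                  penalty[j] += 1
--          else:
--              penalty[i] = penalty[i-1] + 1
--
--      min_penalty, close_time = len(penalty), 0
--      for i in range(len(penalty)):
--          if penalty[i] < min_penalty:
--              min_penalty = penalty[i]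
--              close_time = i
--      return close_time
-- ===== SOURCE B (Python) =====
-- def bestClosingTime_3(customers: str) -> int:
--     # One pass: running score = (non-'Y' seen so far) - ('Y' seen so far);
--     # the penalty at hour i differs from this score by the constant total 'Y' count,
--     # so the first minimum of the score is the answer.
--     best, close_time, score = 0, 0, 0
--     for i, c in enumerate(customers, 1):
--         score += -1 if c == 'Y' else 1
--         if score < best:
--             best, close_time = score, i
--     return close_time
-- ===== Notes on version B (the rewrite author's own statement) =====
-- stated objective: faster
-- what changed: Replaced the O(n^2) penalty-table construction (incrementing a whole prefix on every 'Y') plus a separate argmin scan by a single linear pass over a running score that differs from the penalty by a constant, tracking the first minimum on the fly.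
import Mathlib
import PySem

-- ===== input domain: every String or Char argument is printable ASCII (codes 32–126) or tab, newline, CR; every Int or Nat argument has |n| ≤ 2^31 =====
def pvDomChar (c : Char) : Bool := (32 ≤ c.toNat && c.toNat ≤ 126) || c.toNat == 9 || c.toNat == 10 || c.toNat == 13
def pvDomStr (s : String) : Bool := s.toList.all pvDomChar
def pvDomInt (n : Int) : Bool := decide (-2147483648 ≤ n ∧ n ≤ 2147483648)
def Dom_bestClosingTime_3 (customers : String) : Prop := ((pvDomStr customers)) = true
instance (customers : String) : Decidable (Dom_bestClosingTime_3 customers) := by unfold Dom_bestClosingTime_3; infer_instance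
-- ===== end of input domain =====

-- B replaces A's O(n^2) penalty-table build plus separate argmin scan by one linear pass over a
-- running score that differs from each penalty value by a constant, tracking the first minimum.

-- ===== PORT A =====
def bestClosingTime_3 (customers : String) : Int :=
  let cs := customers.toList
  let penalty : List Int := PySem.List.pyRepeat [0] (PySem.Str.len customers + 1)
  let penalty := (PySem.List.enumerate cs 1).foldl (fun penalty p =>
    if p.2 == 'Y' then
      let penalty := PySem.List.pySetD penalty p.1 (PySem.List.pyGetD penalty (p.1 - 1) 0)
      (PySem.List.pyRange 0 p.1 1).foldl
        (fun q j => PySem.List.pySetD q j (PySem.List.pyGetD q j 0 + 1)) penalty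
    else
      PySem.List.pySetD penalty p.1 (PySem.List.pyGetD penalty (p.1 - 1) 0 + 1)) penalty
  let res := (PySem.List.pyRange 0 (penalty.length : Int) 1).foldl (fun st i =>
      if PySem.List.pyGetD penalty i 0 < st.1 then (PySem.List.pyGetD penalty i 0, i) else st)
      ((penalty.length : Int), 0)
  res.2

-- ===== PORT B =====
-- state is Python's (best, close_time, score)
def bestClosingTime_3_alt (customers : String) : Int :=
  let res := (PySem.List.enumerate customers.toList 1).foldl
    (fun (st : Int × Int × Int) p =>
      let score := st.2.2 + (if p.2 == 'Y' then -1 else 1)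
      if score < st.1 then (score, p.1, score) else (st.1, st.2.1, score))
    (0, 0, 0)
  res.2.1

-- ===== PRECONDITION & SPEC =====
def Spec_bestClosingTime_3 (customers : String) (out : Int) : Prop := out = bestClosingTime_3_alt customers
instance (customers : String) (out : Int) : Decidable (Spec_bestClosingTime_3 customers out) := by unfold Spec_bestClosingTime_3; infer_instance

-- ===== CLAIM (what is proved, stated in full; the proofs are below) =====
def Claim_equal_bestClosingTime_3 : Prop := ∀ (customers : String), Dom_bestClosingTime_3 customers → Spec_bestClosingTime_3 customers (bestClosingTime_3 customers)

-- ===== LEMMAS AND PROOFS =====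

-- the inner loop 'for j in range(i): penalty[j] += 1' adds 1 to the first m entries
theorem pvIncrPrefix (m : Nat) (p : List Int) (hm : m ≤ p.length) :
    (PySem.List.pyRange 0 (m : Int) 1).foldl
      (fun q j => PySem.List.pySetD q j (PySem.List.pyGetD q j 0 + 1)) p
    = (p.take m).map (· + 1) ++ p.drop m := by
  induction m with
  | zero => simp [PySem.List.pyRange_one_eq_nil]
  | succ m ih =>
    have hm' : m ≤ p.length := Nat.le_of_succ_le hm
    have hlt : m < p.length := hm
    have hcast : ((m + 1 : Nat) : Int) = (m : Int) + 1 := by push_cast; ring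
    rw [hcast, PySem.List.pyRange_one_succ_right (by positivity), List.foldl_append, ih hm']
    have hlen : ((p.take m).map (· + 1)).length = m := by simp [hm']
    have hget : PySem.List.pyGetD ((p.take m).map (· + 1) ++ p.drop m) (m : Int) 0 = p[m] := by
      rw [PySem.List.pyGetD_natCast]
      simp [List.getD, List.getElem?_append_right, List.getElem?_drop, Nat.min_eq_left hm', List.getElem?_eq_getElem hlt]
    simp only [List.foldl_cons, List.foldl_nil, hget, PySem.List.pySetD_natCast]
    rw [List.set_append_right _ _ (by omega), hlen, Nat.sub_self,
        List.drop_eq_getElem_cons hlt, List.set_cons_zero, List.take_add_one]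
    rw [List.getElem?_eq_getElem hlt, List.map_append]
    simp only [List.map_cons, List.map_nil, List.append_assoc, List.singleton_append,
      Option.toList_some]

-- 'Y'-count, non-'Y'-count, B's running score, A's final penalty value, A's penalty table
def pvNY (l : List Char) : Int := (l.countP (fun c => c == 'Y') : Int)
def pvNN (l : List Char) : Int := (l.countP (fun c => !(c == 'Y')) : Int)
def pvSd (l : List Char) : Int := pvNN l - pvNY l
theorem pvNY_append (l t : List Char) : pvNY (l ++ t) = pvNY l + pvNY t := by
  simp [pvNY, List.countP_append]
def pvQ (pre : List Char) (i : Nat) : Int := pvNN (pre.take i) + pvNY (pre.drop i)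
def pvP (n : Nat) (pre : List Char) : List Int :=
  (List.range (n + 1)).map (fun i => if i ≤ pre.length then pvQ pre i else 0)

theorem pvQ_append_le (pre : List Char) (c : Char) (i : Nat) (hi : i ≤ pre.length) :
    pvQ (pre ++ [c]) i = pvQ pre i + (if c == 'Y' then 1 else 0) := by
  rw [pvQ, pvQ, List.take_append_of_le_length hi, List.drop_append_of_le_length hi]
  simp only [pvNY, pvNN, List.countP_append, List.countP_cons, List.countP_nil]
  by_cases hc : (c == 'Y') = true <;> simp [hc]
  ring

theorem pvQ_append_self (pre : List Char) (c : Char) :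
    pvQ (pre ++ [c]) (pre.length + 1) = pvNN pre + (if c == 'Y' then 0 else 1) := by
  have h : pre.length + 1 = (pre ++ [c]).length := by simp
  rw [h]
  show pvQ (pre ++ [c]) (pre ++ [c]).length = _
  rw [pvQ]
  simp only [List.take_length, List.drop_length, pvNY, pvNN, List.countP_append,
    List.countP_cons, List.countP_nil]
  by_cases hc : (c == 'Y') = true <;> simp [hc]

theorem pvQ_len (pre : List Char) : pvQ pre pre.length = pvNN pre := by
  simp [pvQ, pvNY, pvNN]

theorem pvStepY (n : Nat) (pre : List Char) (c : Char) (hc : (c == 'Y') = true)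
    (hn : pre.length < n) :
    (((pvP n pre).set (pre.length + 1) (pvNN pre)).take (pre.length + 1)).map (· + 1) ++
      ((pvP n pre).set (pre.length + 1) (pvNN pre)).drop (pre.length + 1)
    = pvP n (pre ++ [c]) := by
  apply List.ext_getElem
  · simp [pvP]; omega
  · intro i h1 h2
    have hiN : i < n + 1 := by simpa [pvP] using h2
    simp only [pvP, List.getElem_append, List.getElem_map, List.getElem_take, List.getElem_drop,
      List.getElem_set, List.length_map, List.length_take, List.length_set, List.length_range,
      List.getElem_range, List.length_append, List.length_singleton,
      Nat.min_eq_left (by omega : pre.length + 1 ≤ n + 1)]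
    split_ifs <;> (first
      | omega
      | (rw [pvQ_append_le pre c _ (by omega)]; simp [hc])
      | (rw [show i = pre.length + 1 by omega, pvQ_append_self pre c]; simp [hc]))

theorem pvStepN (n : Nat) (pre : List Char) (c : Char) (hc : (c == 'Y') = false) :
    (pvP n pre).set (pre.length + 1) (pvNN pre + 1) = pvP n (pre ++ [c]) := by
  apply List.ext_getElem
  · simp [pvP]
  · intro i h1 h2
    have hiN : i < n + 1 := by simpa [pvP] using h2
    simp only [pvP, List.getElem_set, List.getElem_map, List.getElem_range,
      List.length_append, List.length_singleton]
    split_ifs <;> (first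
      | omega
      | (rw [show i = pre.length + 1 by omega, pvQ_append_self pre c]; simp [hc])
      | (rw [pvQ_append_le pre c _ (by omega)]; simp [hc]))

-- invariant of A's build loop
theorem pvBuild (ds pre : List Char) :
    (PySem.List.enumerate ds ((pre.length : Int) + 1)).foldl (fun penalty p =>
      if p.2 == 'Y' then
        let penalty := PySem.List.pySetD penalty p.1 (PySem.List.pyGetD penalty (p.1 - 1) 0)
        (PySem.List.pyRange 0 p.1 1).foldl
          (fun q j => PySem.List.pySetD q j (PySem.List.pyGetD q j 0 + 1)) penalty
      else
        PySem.List.pySetD penalty p.1 (PySem.List.pyGetD penalty (p.1 - 1) 0 + 1))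
      (pvP (pre ++ ds).length pre)
    = pvP (pre ++ ds).length (pre ++ ds) := by
  induction ds generalizing pre with
  | nil => simp
  | cons c t ih =>
    have hn : pre.length < (pre ++ c :: t).length := by simp
    rw [PySem.List.enumerate_cons, List.foldl_cons]
    have e2 : ((pre.length : Int) + 1) = ((pre.length + 1 : Nat) : Int) := by push_cast; ring
    have hget : PySem.List.pyGetD (pvP (pre ++ c :: t).length pre)
        (((pre.length + 1 : Nat) : Int) - 1) 0 = pvNN pre := by
      rw [show (((pre.length + 1 : Nat) : Int) - 1) = ((pre.length : Nat) : Int) by push_cast; ring,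
        PySem.List.pyGetD_natCast]
      simp [pvP, pvQ_len]
    have hsetlen : pre.length + 1 ≤ ((pvP (pre ++ c :: t).length pre).set
        (pre.length + 1) (pvNN pre)).length := by
      simp [pvP]
    have ecast : ((pre.length + 1 : Nat) : Int) + 1 = (((pre ++ [c]).length : Nat) : Int) + 1 := by
      simp
    by_cases hc : (c == 'Y') = true
    · simp only [hc, if_true, e2, hget, PySem.List.pySetD_natCast]
      rw [pvIncrPrefix _ _ hsetlen, pvStepY _ pre c hc hn]
      have h := ih (pre ++ [c])
      rw [ecast]
      simpa [List.append_assoc] using h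
    · simp only [hc, if_false, Bool.false_eq_true, e2, hget, PySem.List.pySetD_natCast]
      rw [pvStepN _ pre c (by simpa using hc)]
      have h := ih (pre ++ [c])
      rw [ecast]
      simpa [List.append_assoc] using h

theorem pvSd_append (pre : List Char) (c : Char) :
    pvSd (pre ++ [c]) = pvSd pre + (if c == 'Y' then -1 else 1) := by
  simp only [pvSd, pvNY, pvNN, List.countP_append, List.countP_cons, List.countP_nil]
  by_cases hc : (c == 'Y') = true <;> simp [hc] <;> ring

theorem pvTakeSucc (pre t : List Char) (c : Char) :
    (pre ++ c :: t).take (pre.length + 1) = pre ++ [c] := by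
  rw [show pre.length + 1 = pre.length + 1 by rfl]
  rw [List.take_append]
  simp

-- the two minimum scans agree step for step
theorem pvScan (cs : List Char) (ds pre : List Char) (best ct : Int) (hcs : cs = pre ++ ds) :
    ((PySem.List.enumerate ds ((pre.length : Int) + 1)).foldl (fun st i =>
        if pvSd (cs.take i.1.toNat) + pvNY cs < st.1
        then (pvSd (cs.take i.1.toNat) + pvNY cs, i.1) else st)
      (best + pvNY cs, ct)).2
    = ((PySem.List.enumerate ds ((pre.length : Int) + 1)).foldl
        (fun (st : Int × Int × Int) p =>
          let score := st.2.2 + (if p.2 == 'Y' then -1 else 1)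
          if score < st.1 then (score, p.1, score) else (st.1, st.2.1, score))
        (best, ct, pvSd pre)).2.1 := by
  induction ds generalizing pre best ct with
  | nil => simp
  | cons c t ih =>
    subst hcs
    rw [PySem.List.enumerate_cons, List.foldl_cons, List.foldl_cons]
    have htoNat : ((pre.length : Int) + 1).toNat = pre.length + 1 := by omega
    have htake : (pre ++ c :: t).take (pre.length + 1) = pre ++ [c] := pvTakeSucc pre t c
    simp only [htoNat, htake, ← pvSd_append pre c]
    have hcond : (pvSd (pre ++ [c]) + pvNY (pre ++ c :: t) < best + pvNY (pre ++ c :: t))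
        ↔ (pvSd (pre ++ [c]) < best) := by constructor <;> intro h <;> linarith
    have ecast : ((pre.length : Int) + 1) + 1 = (((pre ++ [c]).length : Nat) : Int) + 1 := by
      simp
    by_cases h : pvSd (pre ++ [c]) < best
    · rw [if_pos (hcond.mpr h), if_pos h]
      have := ih (pre ++ [c]) (pvSd (pre ++ [c])) ((pre.length : Int) + 1)
        (by simp [List.append_assoc])
      rw [ecast]
      simpa [List.append_assoc, pvSd_append] using this
    · rw [if_neg (fun hh => h (hcond.mp hh)), if_neg h]
      have := ih (pre ++ [c]) best ct (by simp [List.append_assoc])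
      rw [ecast]
      simpa [List.append_assoc, pvSd_append] using this

theorem pvP_nil (n : Nat) : pvP n [] = List.replicate (n + 1) (0:Int) := by
  apply List.ext_getElem <;> simp [pvP, pvQ, pvNY, pvNN]

theorem pvQ_sd (cs : List Char) (i : Nat) : pvQ cs i = pvSd (cs.take i) + pvNY cs := by
  have h : pvNY cs = pvNY (cs.take i) + pvNY (cs.drop i) := by
    rw [← pvNY_append, List.take_append_drop]
  rw [h, pvQ, pvSd]; ring

theorem pvMain (customers : String) :
    bestClosingTime_3 customers = bestClosingTime_3_alt customers := by
  unfold bestClosingTime_3 bestClosingTime_3_alt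
  simp only []
  set cs := customers.toList with hcs
  have hinit : PySem.List.pyRepeat [0] (PySem.Str.len customers + 1) = pvP cs.length [] := by
    rw [pvP_nil, PySem.List.pyRepeat_singleton]
    have : (PySem.Str.len customers + 1).toNat = cs.length + 1 := by
      simp [PySem.Str.len_eq, ← hcs]
    rw [this]
  rw [hinit]
  have hbuild := pvBuild cs []
  simp only [List.nil_append, List.length_nil, Nat.cast_zero, zero_add] at hbuild
  rw [hbuild]
  have hlen : (pvP cs.length cs).length = cs.length + 1 := by simp [pvP]
  rw [hlen]
  have hsplit : PySem.List.pyRange 0 ((cs.length + 1 : Nat) : Int) 1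
      = 0 :: PySem.List.pyRange 1 ((cs.length + 1 : Nat) : Int) 1 := by
    rw [PySem.List.pyRange_one_cons (by positivity)]
    norm_num
  rw [hsplit, List.foldl_cons]
  have h0 : PySem.List.pyGetD (pvP cs.length cs) 0 0 = pvNY cs := by
    simp [PySem.List.pyGetD_zero, pvP, pvQ, List.getD, pvNN]
  rw [h0]
  have hYle : pvNY cs < ((cs.length + 1 : Nat) : Int) := by
    have := List.countP_le_length (l := cs) (p := fun c => c == 'Y')
    simp only [pvNY]
    omega
  rw [if_pos hYle]
  have hrange : PySem.List.pyRange 1 ((cs.length + 1 : Nat) : Int) 1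
      = (PySem.List.enumerate cs 1).map (·.1) := by
    rw [PySem.List.map_fst_enumerate]
    congr 1
    push_cast
    ring
  rw [hrange, List.foldl_map]
  have hcong : ∀ (acc : Int × Int) (p : Int × Char), p ∈ PySem.List.enumerate cs 1 →
      (if PySem.List.pyGetD (pvP cs.length cs) p.1 0 < acc.1
       then (PySem.List.pyGetD (pvP cs.length cs) p.1 0, p.1) else acc)
      = (if pvSd (cs.take p.1.toNat) + pvNY cs < acc.1
         then (pvSd (cs.take p.1.toNat) + pvNY cs, p.1) else acc) := by
    intro acc p hp
    rw [PySem.List.mem_enumerate_iff] at hp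
    obtain ⟨k, hk, rfl⟩ := hp
    have e : (1 + (k : Int)) = ((k + 1 : Nat) : Int) := by push_cast; ring
    have hget : PySem.List.pyGetD (pvP cs.length cs) (1 + (k : Int)) 0
        = pvSd (cs.take (k + 1)) + pvNY cs := by
      rw [e, PySem.List.pyGetD_natCast]
      simp only [pvP, List.getD, List.getElem?_map, List.getElem?_range (by omega : k + 1 < cs.length + 1)]
      simp only [Option.map_some, Option.getD_some]
      rw [if_pos (by omega : k + 1 ≤ cs.length), pvQ_sd]
    have etn : (1 + (k : Int)).toNat = k + 1 := by omega
    rw [hget, etn]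
  have hfold := PySem.List.foldl_congr_mem
    (f := fun (acc : Int × Int) (p : Int × Char) =>
      if PySem.List.pyGetD (pvP cs.length cs) p.1 0 < acc.1
      then (PySem.List.pyGetD (pvP cs.length cs) p.1 0, p.1) else acc)
    (g := fun (acc : Int × Int) (p : Int × Char) =>
      if pvSd (cs.take p.1.toNat) + pvNY cs < acc.1
      then (pvSd (cs.take p.1.toNat) + pvNY cs, p.1) else acc)
    (l := PySem.List.enumerate cs 1)
    (init := ((pvNY cs : Int), (0 : Int))) hcong
  simp only [hfold]
  have hscan := pvScan cs cs [] 0 0 (by simp)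
  simp only [List.length_nil, Nat.cast_zero, zero_add] at hscan
  simpa [pvSd, pvNY, pvNN] using hscan

-- ===== VERDICT (by name: the statement is the Claim_ definition above) =====
theorem bestClosingTime_3_spec : Claim_equal_bestClosingTime_3 := by
  intro customers _
  unfold Spec_bestClosingTime_3
  exact pvMain customers
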